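-- pv_equiv track=rewrite | github.com/lofimizumo/flask_docker_image | algorithms.py | _get_charging_window
-- ===== SOURCE A (Python) =====
-- def _get_charging_window(battery_charge_schedule):
--     p_left = 0
--     p_right = 0
--     durations = []
--     while p_right < len(battery_charge_schedule)-1:
--         p_right += 1
--         if battery_charge_schedule[p_right] == 0 or p_right == len(battery_charge_schedule)-1:
--             if p_right - p_left > 1:
--                 durations.append((p_left+1, p_right-p_left-1))
--             p_left = p_right
--     return durations
-- ===== SOURCE B (Python) =====
-- def _get_charging_window(battery_charge_schedule):
--     n = len(battery_charge_schedule)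
--     if n < 2:
--         return []
--     boundaries = [0]
--     for i in range(1, n):
--         if battery_charge_schedule[i] == 0:
--             boundaries.append(i)
--     if boundaries[-1] != n - 1:
--         boundaries.append(n - 1)
--     return [(a + 1, b - a - 1)
--             for a, b in zip(boundaries, boundaries[1:]) if b - a > 1]
-- ===== Notes on version B (the rewrite author's own statement) =====
-- stated objective: alternative
-- what changed: Replaces the interleaved two-pointer while-loop with two separate passes: first collect the boundary indices (0, each zero index, and n-1), then emit the windows from adjacent boundary pairs with a comprehension over zip(boundaries, boundaries[1:]).
import Mathlib
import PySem

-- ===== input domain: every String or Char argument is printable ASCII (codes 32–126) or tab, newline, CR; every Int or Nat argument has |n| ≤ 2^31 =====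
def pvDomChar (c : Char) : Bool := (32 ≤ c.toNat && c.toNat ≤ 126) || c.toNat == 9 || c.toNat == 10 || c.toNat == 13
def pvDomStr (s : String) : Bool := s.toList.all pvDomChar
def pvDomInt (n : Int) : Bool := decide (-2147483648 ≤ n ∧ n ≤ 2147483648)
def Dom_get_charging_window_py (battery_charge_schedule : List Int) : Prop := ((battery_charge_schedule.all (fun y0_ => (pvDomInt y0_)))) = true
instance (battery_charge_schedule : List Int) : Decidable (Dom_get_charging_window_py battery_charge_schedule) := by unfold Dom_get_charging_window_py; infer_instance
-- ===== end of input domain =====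

-- B replaces A's interleaved two-pointer scan by a boundary-index table plus a pairwise pass (alternative decomposition, same cost).

-- ===== PORT A =====
-- A's while-loop body: p_right takes the values 1 .. len-1; the state is (p_left, durations).
-- The index i is always in range (1 ≤ i ≤ len-1), so '.getD 0' after pyGet? is never taken.
def stepA_get_charging_window (s : List Int) (n : Int)
    (st : Int × List (Int × Int)) (i : Int) : Int × List (Int × Int) :=
  if (PySem.List.pyGet? s i).getD 0 = 0 ∨ i = n - 1 then
    if i - st.1 > 1 then (i, st.2 ++ [(st.1 + 1, i - st.1 - 1)]) else (i, st.2)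
  else st

def get_charging_window_py (battery_charge_schedule : List Int) : List (Int × Int) :=
  let n : Int := battery_charge_schedule.length
  ((PySem.List.pyRange 1 n 1).foldl (stepA_get_charging_window battery_charge_schedule n) (0, [])).2

-- ===== PORT B =====
def get_charging_window_py_alt (battery_charge_schedule : List Int) : List (Int × Int) :=
  let n : Int := battery_charge_schedule.length
  if n < 2 then []
  else
    -- boundaries = [0] ++ the zero indices of range(1, n); index always in range, '.getD 0' never taken
    let bs0 : List Int :=
      0 :: (PySem.List.pyRange 1 n 1).filter (fun i => (PySem.List.pyGet? battery_charge_schedule i).getD 0 = 0)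
    let bs : List Int := if bs0.getLast? = some (n - 1) then bs0 else bs0 ++ [n - 1]
    (bs.zip bs.tail).filterMap (fun p => if p.2 - p.1 > 1 then some (p.1 + 1, p.2 - p.1 - 1) else none)

-- ===== PRECONDITION & SPEC =====
def Spec_get_charging_window_py (battery_charge_schedule : List Int) (out : List (Int × Int)) : Prop := out = get_charging_window_py_alt battery_charge_schedule
instance (battery_charge_schedule : List Int) (out : List (Int × Int)) : Decidable (Spec_get_charging_window_py battery_charge_schedule out) := by unfold Spec_get_charging_window_py; infer_instance

-- ===== CLAIM (what is proved, stated in full; the proofs are below) =====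
def Claim_equal_get_charging_window_py : Prop := ∀ (battery_charge_schedule : List Int), Dom_get_charging_window_py battery_charge_schedule → Spec_get_charging_window_py battery_charge_schedule (get_charging_window_py battery_charge_schedule)

-- ===== LEMMAS AND PROOFS =====

-- Common form: consume the boundary list pairwise with the previous boundary carried along.
def pvPairs (pl : Int) (bs : List Int) : List (Int × Int) :=
  match bs with
  | [] => []
  | b :: rest => (if b - pl > 1 then [(pl + 1, b - pl - 1)] else []) ++ pvPairs b rest

-- A's fold over any index list equals pvPairs over the filtered boundary indices.
theorem foldA_eq_pvPairs (s : List Int) (n : Int) (l : List Int) :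
    ∀ (pl : Int) (acc : List (Int × Int)),
      ((l.foldl (stepA_get_charging_window s n) (pl, acc)).2)
        = acc ++ pvPairs pl (l.filter (fun i => decide ((PySem.List.pyGet? s i).getD 0 = 0 ∨ i = n - 1))) := by
  induction l with
  | nil => intro pl acc; simp [pvPairs]
  | cons i t ih =>
    intro pl acc
    by_cases hb : (PySem.List.pyGet? s i).getD 0 = 0 ∨ i = n - 1
    · by_cases hg : i - pl > 1
      · simp [stepA_get_charging_window, hb, hg, pvPairs, ih]
      · simp [stepA_get_charging_window, hb, hg, pvPairs, ih]
    · simp [stepA_get_charging_window, hb, ih]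

-- B's zip/filterMap pass equals pvPairs.
theorem zip_filterMap_eq_pvPairs (rest : List Int) :
    ∀ (pl : Int),
      (((pl :: rest).zip rest).filterMap
          (fun p : Int × Int => if p.2 - p.1 > 1 then some (p.1 + 1, p.2 - p.1 - 1) else none))
        = pvPairs pl rest := by
  induction rest with
  | nil => intro pl; simp [pvPairs]
  | cons b t ih =>
    intro pl
    by_cases hg : b - pl > 1
    · simp [pvPairs, hg, ih]
    · simp [pvPairs, hg, ih]

-- Every element of the zero-filtered boundary prefix over range(1, m) is < m.
theorem filter_lt (s : List Int) (m : Int) (x : Int)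
    (hx : x ∈ (PySem.List.pyRange 1 m 1).filter (fun i => (PySem.List.pyGet? s i).getD 0 = 0)) :
    x < m := by
  have := List.of_mem_filter hx
  have hmem := List.mem_of_mem_filter hx
  exact (PySem.List.mem_pyRange_one.mp hmem).2

-- B's boundary tail (zero indices of range(1,n), with n-1 appended unless already last)
-- equals A's boundary filter (zero OR last index) over range(1, n), for n ≥ 2.
theorem boundaries_eq (s : List Int) (n : Int) (hn : 2 ≤ n) :
    (if ((0 : Int) :: (PySem.List.pyRange 1 n 1).filter (fun i => (PySem.List.pyGet? s i).getD 0 = 0)).getLast? = some (n - 1)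
       then (0 : Int) :: (PySem.List.pyRange 1 n 1).filter (fun i => (PySem.List.pyGet? s i).getD 0 = 0)
       else ((0 : Int) :: (PySem.List.pyRange 1 n 1).filter (fun i => (PySem.List.pyGet? s i).getD 0 = 0)) ++ [n - 1]).tail
      = (PySem.List.pyRange 1 n 1).filter
          (fun i => decide ((PySem.List.pyGet? s i).getD 0 = 0 ∨ i = n - 1)) := by
  have hsplit : PySem.List.pyRange 1 n 1
      = PySem.List.pyRange 1 (n - 1) 1 ++ [n - 1] := by
    have h := PySem.List.pyRange_one_succ_right (a := 1) (b := n - 1) (by omega)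
    rw [show n - 1 + 1 = n by ring] at h
    exact h
  set P := fun i => decide ((PySem.List.pyGet? s i).getD 0 = 0) with hP
  set Q := fun i => decide ((PySem.List.pyGet? s i).getD 0 = 0 ∨ i = n - 1) with hQ
  have hPQ : ∀ x ∈ PySem.List.pyRange 1 (n - 1) 1, P x = Q x := by
    intro x hx
    have hxlt : x < n - 1 := (PySem.List.mem_pyRange_one.mp hx).2
    simp [hP, hQ]
    intro h; omega
  have hfilter_pre : (PySem.List.pyRange 1 (n - 1) 1).filter Q
      = (PySem.List.pyRange 1 (n - 1) 1).filter P :=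
    List.filter_congr (fun x hx => (hPQ x hx).symm)
  by_cases hz : (PySem.List.pyGet? s (n - 1)).getD 0 = 0
  · -- last element is a zero: n-1 already ends the zero-filter, no append
    have hfull : (PySem.List.pyRange 1 n 1).filter P
        = (PySem.List.pyRange 1 (n - 1) 1).filter P ++ [n - 1] := by
      rw [hsplit, List.filter_append]
      simp [hP, hz]
    have hQfull : (PySem.List.pyRange 1 n 1).filter Q
        = (PySem.List.pyRange 1 (n - 1) 1).filter P ++ [n - 1] := by
      rw [hsplit, List.filter_append, hfilter_pre]
      simp [hQ, hz]
    have hlast : ((0 : Int) :: (PySem.List.pyRange 1 n 1).filter P).getLast? = some (n - 1) := by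
      rw [hfull,
        show (0 : Int) :: ((PySem.List.pyRange 1 (n - 1) 1).filter P ++ [n - 1])
            = ((0 : Int) :: (PySem.List.pyRange 1 (n - 1) 1).filter P) ++ [n - 1] from rfl,
        List.getLast?_concat]
    rw [if_pos hlast, List.tail_cons, hfull, hQfull]
  · -- last element nonzero: zero-filter misses n-1, B appends it
    have hfull : (PySem.List.pyRange 1 n 1).filter P
        = (PySem.List.pyRange 1 (n - 1) 1).filter P := by
      rw [hsplit, List.filter_append]
      simp [hP, hz]
    have hQfull : (PySem.List.pyRange 1 n 1).filter Q
        = (PySem.List.pyRange 1 (n - 1) 1).filter P ++ [n - 1] := by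
      rw [hsplit, List.filter_append, hfilter_pre]
      simp [hQ, hz]
    have hne : ((0 : Int) :: (PySem.List.pyRange 1 n 1).filter P).getLast? ≠ some (n - 1) := by
      intro hc
      rcases List.getLast?_eq_some_iff.mp hc with ⟨l', hl'⟩
      have hmem : (n - 1) ∈ (0 : Int) :: (PySem.List.pyRange 1 n 1).filter P := by
        rw [hl']; simp
      rcases List.mem_cons.mp hmem with h0 | hf
      · omega
      · have hfn : (n - 1) ∈ (PySem.List.pyRange 1 (n - 1) 1).filter P := by
          rw [hfull] at hf; exact hf
        have := filter_lt s (n - 1) (n - 1) hfn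
        omega
    rw [if_neg hne, List.cons_append, List.tail_cons, hQfull, hfull]

-- ===== VERDICT (by name: the statement is the Claim_ definition above) =====
theorem get_charging_window_py_spec : Claim_equal_get_charging_window_py := by
  intro s _
  show get_charging_window_py s = get_charging_window_py_alt s
  unfold get_charging_window_py get_charging_window_py_alt
  by_cases h2 : ((s.length : Int) < 2)
  · have hr : PySem.List.pyRange 1 (s.length : Int) 1 = [] :=
      PySem.List.pyRange_one_eq_nil (by omega)
    simp [hr, h2]
  · simp only [if_neg h2]
    rw [foldA_eq_pvPairs]
    set bs : List Int :=
      if ((0 : Int) :: (PySem.List.pyRange 1 (s.length : Int) 1).filter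
            (fun i => (PySem.List.pyGet? s i).getD 0 = 0)).getLast? = some ((s.length : Int) - 1)
        then (0 : Int) :: (PySem.List.pyRange 1 (s.length : Int) 1).filter
            (fun i => (PySem.List.pyGet? s i).getD 0 = 0)
        else ((0 : Int) :: (PySem.List.pyRange 1 (s.length : Int) 1).filter
            (fun i => (PySem.List.pyGet? s i).getD 0 = 0)) ++ [(s.length : Int) - 1] with hbs
    have htail : bs.tail
        = (PySem.List.pyRange 1 (s.length : Int) 1).filter
            (fun i => decide ((PySem.List.pyGet? s i).getD 0 = 0 ∨ i = (s.length : Int) - 1)) := by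
      rw [hbs]; exact boundaries_eq s (s.length : Int) (by omega)
    have hcons : bs = 0 :: bs.tail := by
      rw [hbs]; split_ifs <;> rfl
    conv_rhs => rw [hcons]
    simp only [List.tail_cons]
    rw [zip_filterMap_eq_pvPairs, htail]
    simp
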